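-- pv_equiv track=rewrite | github.com/ArjunSubramonian/random-graphs-PL | cnfgen.py | triangle_dnf
-- ===== SOURCE A (Python) =====
-- def ordered_edges(num_nodes):
--     """
--     Arbitrarily (but consistently) orders all edges in a graph of size num_nodes.
--     Returns:
--     1. a list of tuples, where each tuple (a, b) represents an undirected edge
--        between nodes a and b (0-indexed).
--     2. reverse dictionary, mapping each (a, b) to a unique index
--     """
--     order = []
--     edge_indices = {}
--     for i in range(num_nodes):
--         for j in range(i + 1, num_nodes):
--             edge_indices[(i, j)] = len(order)
--             edge_indices[(j, i)] = len(order)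
--             order.append((i, j))
--     return order, edge_indices
--
-- def triangle_dnf(num_nodes):
--     """
--     Returns a DNF where each clause is a possible triangle in
--     a graph of size num_nodes.
--     Every atom is an index into ordered_edges.
--     """
--     _, edge_indices = ordered_edges(num_nodes)
--     out = []
--     for i in range(num_nodes):
--         for j in range(i + 1, num_nodes):
--             for k in range(j + 1, num_nodes):
--                 out.append(
--                     [edge_indices[(i, j)], edge_indices[(j, k)], edge_indices[(k, i)]]
--                 )
--     return out
-- ===== SOURCE B (Python) =====
-- def triangle_dnf(num_nodes):
--     def idx(a, b):
--         p, q = (a, b) if a < b else (b, a)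
--         return p * num_nodes - p * (p + 1) // 2 + (q - p - 1)
--     return [
--         [idx(i, j), idx(j, k), idx(k, i)]
--         for i in range(num_nodes)
--         for j in range(i + 1, num_nodes)
--         for k in range(j + 1, num_nodes)
--     ]
-- ===== Notes on version B (the rewrite author's own statement) =====
-- stated objective: simpler
-- what changed: Dropped the ordered_edges helper and its precomputed reverse dictionary entirely; each edge index is computed directly by the closed-form formula p*n - p*(p+1)//2 + (q-p-1) on the sorted pair, and the output is one list comprehension with no mutable state.
import Mathlib
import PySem

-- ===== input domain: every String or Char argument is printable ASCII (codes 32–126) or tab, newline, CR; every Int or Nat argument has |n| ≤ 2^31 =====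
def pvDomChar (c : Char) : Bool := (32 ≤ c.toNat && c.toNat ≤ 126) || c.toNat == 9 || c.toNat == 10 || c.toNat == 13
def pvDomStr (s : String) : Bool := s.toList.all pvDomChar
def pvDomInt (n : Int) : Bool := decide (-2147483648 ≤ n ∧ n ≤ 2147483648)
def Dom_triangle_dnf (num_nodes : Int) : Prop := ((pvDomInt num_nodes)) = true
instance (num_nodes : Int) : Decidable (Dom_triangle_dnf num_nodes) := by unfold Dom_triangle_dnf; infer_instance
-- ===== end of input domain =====

-- B drops the ordered_edges dict entirely and computes each edge index by a closed-form formula (objective: simpler).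

-- ===== PORT A =====
-- ordered_edges: builds the (order, edge_indices) state with the nested range loops, exactly as A does.
def ordered_edges (num_nodes : Int) :
    List (Int × Int) × PySem.Dict (Int × Int) Int :=
  (PySem.List.pyRange 0 num_nodes 1).foldl
    (fun st i =>
      (PySem.List.pyRange (i + 1) num_nodes 1).foldl
        (fun st j =>
          (st.1 ++ [(i, j)],
           (st.2.insert (i, j) (st.1.length : Int)).insert (j, i) (st.1.length : Int)))
        st)
    ([], PySem.Dict.empty)

-- edge_indices[(i,j)] can raise KeyError in general; here every key looked up was inserted by
-- ordered_edges (proved in dict_get_final below), so getD with an arbitrary default is exact.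
def triangle_dnf (num_nodes : Int) : List (List Int) :=
  let ei := (ordered_edges num_nodes).2
  (PySem.List.pyRange 0 num_nodes 1).foldl
    (fun out i =>
      (PySem.List.pyRange (i + 1) num_nodes 1).foldl
        (fun out j =>
          (PySem.List.pyRange (j + 1) num_nodes 1).foldl
            (fun out k =>
              out ++ [[ei.getD (i, j) 0, ei.getD (j, k) 0, ei.getD (k, i) 0]])
            out)
        out)
    []

-- ===== PORT B =====
-- idx(a, b): closed-form index of the undirected edge {a, b}.
def tri_idx (num_nodes a b : Int) : Int :=
  let p := if a < b then a else b
  let q := if a < b then b else a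
  p * num_nodes - PySem.Int.floordiv (p * (p + 1)) 2 + (q - p - 1)

def triangle_dnf_alt (num_nodes : Int) : List (List Int) :=
  (PySem.List.pyRange 0 num_nodes 1).flatMap fun i =>
    (PySem.List.pyRange (i + 1) num_nodes 1).flatMap fun j =>
      (PySem.List.pyRange (j + 1) num_nodes 1).map fun k =>
        [tri_idx num_nodes i j, tri_idx num_nodes j k, tri_idx num_nodes k i]

-- ===== PRECONDITION & SPEC =====
def Spec_triangle_dnf (num_nodes : Int) (out : List (List Int)) : Prop := out = triangle_dnf_alt num_nodes
instance (num_nodes : Int) (out : List (List Int)) : Decidable (Spec_triangle_dnf num_nodes out) := by unfold Spec_triangle_dnf; infer_instance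

-- ===== CLAIM (what is proved, stated in full; the proofs are below) =====
def Claim_equal_triangle_dnf : Prop := ∀ (num_nodes : Int), Dom_triangle_dnf num_nodes → Spec_triangle_dnf num_nodes (triangle_dnf num_nodes)

-- ===== LEMMAS AND PROOFS =====

-- number of edges (i, j) with i < row, i < j < n: the base index of row `row`
def edgeBase (n row : Int) : Int := row * n - row * (row + 1) / 2

theorem edgeBase_succ (n r : Int) : edgeBase n (r + 1) = edgeBase n r + (n - r - 1) := by
  unfold edgeBase
  have h : (r + 1) * ((r + 1) + 1) = r * (r + 1) + (r + 1) * 2 := by ring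
  rw [h, Int.add_mul_ediv_right _ _ (by norm_num : (2 : Int) ≠ 0)]
  ring

theorem pyRange_empty_of_le {a b : Int} (h : b ≤ a) : PySem.List.pyRange a b 1 = [] := by
  rw [PySem.List.pyRange_one]
  have : (b - a).toNat = 0 := by omega
  simp [this]

theorem tri_idx_eq (n a b : Int) :
    tri_idx n a b = edgeBase n (min a b) + (max a b - min a b - 1) := by
  rcases lt_or_ge a b with h | h
  · simp only [tri_idx, if_pos h, min_eq_left h.le, max_eq_right h.le, edgeBase,
      PySem.Int.floordiv_eq_ediv_of_pos (show (0 : Int) < 2 by norm_num)]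
  · simp only [tri_idx, if_neg (not_lt.mpr h), min_eq_right h, max_eq_left h, edgeBase,
      PySem.Int.floordiv_eq_ediv_of_pos (show (0 : Int) < 2 by norm_num)]

-- the inner loop of ordered_edges, for row i starting at column j
theorem inner_loop_spec (n i : Int) : ∀ (fuel : Nat) (j : Int), j + fuel = n → i < j →
    ∀ (ord : List (Int × Int)) (d : PySem.Dict (Int × Int) Int),
    ((PySem.List.pyRange j n 1).foldl
        (fun st j' =>
          (st.1 ++ [(i, j')],
           (st.2.insert (i, j') (st.1.length : Int)).insert (j', i) (st.1.length : Int)))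
        (ord, d)).1.length = ord.length + fuel ∧
    ∀ (a b : Int),
    ((PySem.List.pyRange j n 1).foldl
        (fun st j' =>
          (st.1 ++ [(i, j')],
           (st.2.insert (i, j') (st.1.length : Int)).insert (j', i) (st.1.length : Int)))
        (ord, d)).2.get? (a, b) =
      if a = i ∧ j ≤ b ∧ b < n then some ((ord.length : Int) + (b - j))
      else if b = i ∧ j ≤ a ∧ a < n then some ((ord.length : Int) + (a - j))
      else d.get? (a, b) := by
  intro fuel
  induction fuel with
  | zero =>
    intro j hj hij ord d
    push_cast at hj
    rw [pyRange_empty_of_le (by omega)]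
    refine ⟨by simp, ?_⟩
    intro a b
    simp only [List.foldl_nil]
    split_ifs with h1 h2 <;> first | omega | rfl
  | succ t ih =>
    intro j hj hij ord d
    push_cast at hj
    have hjn : j < n := by omega
    rw [PySem.List.pyRange_one_cons hjn, List.foldl_cons]
    obtain ⟨ihl, ihg⟩ := ih (j + 1) (by omega) (by omega)
      (ord ++ [(i, j)])
      ((d.insert (i, j) (ord.length : Int)).insert (j, i) (ord.length : Int))
    refine ⟨by rw [ihl]; simp; omega, ?_⟩
    intro a b
    rw [ihg a b]
    have hlen : ((ord ++ [(i, j)]).length : Int) = (ord.length : Int) + 1 := by simp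
    by_cases h1 : a = i ∧ j + 1 ≤ b ∧ b < n
    · rw [if_pos h1, if_pos (by omega : a = i ∧ j ≤ b ∧ b < n), hlen]
      congr 1; omega
    · rw [if_neg h1]
      by_cases h2 : b = i ∧ j + 1 ≤ a ∧ a < n
      · rw [if_pos h2, if_neg (by omega : ¬(a = i ∧ j ≤ b ∧ b < n)),
            if_pos (by omega : b = i ∧ j ≤ a ∧ a < n), hlen]
        congr 1; omega
      · rw [if_neg h2]
        by_cases hji : (a, b) = (j, i)
        · have ha : a = j := by simpa using congrArg Prod.fst hji
          have hb : b = i := by simpa using congrArg Prod.snd hji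
          rw [hji, PySem.Dict.get?_insert_self,
              if_neg (by omega : ¬(a = i ∧ j ≤ b ∧ b < n)),
              if_pos (by omega : b = i ∧ j ≤ a ∧ a < n)]
          congr 1; omega
        · rw [PySem.Dict.get?_insert_of_ne _ _ hji]
          by_cases hij' : (a, b) = (i, j)
          · have ha : a = i := by simpa using congrArg Prod.fst hij'
            have hb : b = j := by simpa using congrArg Prod.snd hij'
            rw [hij', PySem.Dict.get?_insert_self,
                if_pos (by omega : a = i ∧ j ≤ b ∧ b < n)]
            congr 1; omega
          · rw [PySem.Dict.get?_insert_of_ne _ _ hij']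
            have hna : ¬(a = i ∧ j ≤ b ∧ b < n) := by
              rintro ⟨ha, hb1, hb2⟩
              by_cases hbj : b = j
              · exact hij' (by rw [ha, hbj])
              · exact h1 ⟨ha, by omega, hb2⟩
            have hnb : ¬(b = i ∧ j ≤ a ∧ a < n) := by
              rintro ⟨hb, ha1, ha2⟩
              by_cases haj : a = j
              · exact hji (by rw [haj, hb])
              · exact h2 ⟨hb, by omega, ha2⟩
            rw [if_neg hna, if_neg hnb]

-- the outer loop of ordered_edges, starting at row r with accumulated state (ord, d)
theorem outer_loop_spec (n : Int) : ∀ (fuel : Nat) (r : Int), r + fuel = n →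
    ∀ (ord : List (Int × Int)) (d : PySem.Dict (Int × Int) Int),
    (ord.length : Int) = edgeBase n r - edgeBase n 0 → 0 ≤ r →
    ∀ (a b : Int),
    ((PySem.List.pyRange r n 1).foldl
        (fun st i =>
          (PySem.List.pyRange (i + 1) n 1).foldl
            (fun st j =>
              (st.1 ++ [(i, j)],
               (st.2.insert (i, j) (st.1.length : Int)).insert (j, i) (st.1.length : Int)))
            st)
        (ord, d)).2.get? (a, b) =
      if r ≤ min a b ∧ min a b < max a b ∧ max a b < n then
        some ((ord.length : Int) + (edgeBase n (min a b) - edgeBase n r) + (max a b - min a b - 1))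
      else d.get? (a, b) := by
  intro fuel
  induction fuel with
  | zero =>
    intro r hr ord d _ _ a b
    push_cast at hr
    rw [pyRange_empty_of_le (by omega)]
    simp only [List.foldl_nil]
    rw [if_neg (by omega)]
  | succ t ih =>
    intro r hr ord d hlen hr0 a b
    push_cast at hr
    have hrn : r < n := by omega
    have ht : (t : Int) = n - r - 1 := by omega
    rw [PySem.List.pyRange_one_cons hrn, List.foldl_cons]
    obtain ⟨hl', hg'⟩ := inner_loop_spec n r t (r + 1) (by omega) (by omega) ord d
    have hlen2 : (((PySem.List.pyRange (r + 1) n 1).foldl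
        (fun st j =>
          (st.1 ++ [(r, j)],
           (st.2.insert (r, j) (st.1.length : Int)).insert (j, r) (st.1.length : Int)))
        (ord, d)).1.length : Int) = edgeBase n (r + 1) - edgeBase n 0 := by
      rw [hl', edgeBase_succ]
      push_cast
      linarith [hlen, ht]
    set S := (PySem.List.pyRange (r + 1) n 1).foldl
        (fun st j =>
          (st.1 ++ [(r, j)],
           (st.2.insert (r, j) (st.1.length : Int)).insert (j, r) (st.1.length : Int)))
        (ord, d) with hS
    have ih' := ih (r + 1) (by omega) S.1 S.2 hlen2 (by omega) a b
    rw [Prod.mk.eta] at ih'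
    rw [ih', hl']
    by_cases h1 : r + 1 ≤ min a b ∧ min a b < max a b ∧ max a b < n
    · rw [if_pos h1, if_pos (by omega : r ≤ min a b ∧ min a b < max a b ∧ max a b < n),
          edgeBase_succ]
      congr 1
      push_cast
      linarith [ht]
    · rw [if_neg h1, hg' a b]
      by_cases h2 : a = r ∧ r + 1 ≤ b ∧ b < n
      · rw [if_pos h2, if_pos (by omega : r ≤ min a b ∧ min a b < max a b ∧ max a b < n)]
        have hm : min a b = r := by omega
        have hM : max a b = b := by omega
        rw [hm, hM]
        congr 1
        ring
      · rw [if_neg h2]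
        by_cases h3 : b = r ∧ r + 1 ≤ a ∧ a < n
        · rw [if_pos h3, if_pos (by omega : r ≤ min a b ∧ min a b < max a b ∧ max a b < n)]
          have hm : min a b = r := by omega
          have hM : max a b = a := by omega
          rw [hm, hM]
          congr 1
          ring
        · rw [if_neg h3, if_neg (by omega : ¬(r ≤ min a b ∧ min a b < max a b ∧ max a b < n))]

-- the dict built by ordered_edges, characterised in closed form
theorem dict_get_final (n a b : Int) :
    (ordered_edges n).2.get? (a, b) =
      if 0 ≤ min a b ∧ min a b < max a b ∧ max a b < n then
        some (edgeBase n (min a b) + (max a b - min a b - 1))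
      else none := by
  have hb0 : edgeBase n 0 = 0 := by unfold edgeBase; norm_num
  have hnone : (PySem.Dict.empty : PySem.Dict (Int × Int) Int).get? (a, b) = none := rfl
  unfold ordered_edges
  rcases lt_or_ge n 0 with hn0 | hn0
  · rw [pyRange_empty_of_le (by omega)]
    simp only [List.foldl_nil]
    rw [if_neg (by omega)]
    exact hnone
  · rw [outer_loop_spec n n.toNat 0 (by omega) [] PySem.Dict.empty (by simp [hb0]) le_rfl a b]
    by_cases h : 0 ≤ min a b ∧ min a b < max a b ∧ max a b < n
    · rw [if_pos h, if_pos h, hb0]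
      norm_num
    · rw [if_neg h, if_neg h]
      exact hnone

-- getD agrees with the closed-form index on every pair the triple loop looks up
theorem getD_eq_tri_idx (n a b : Int) (h0 : 0 ≤ min a b) (hab : min a b < max a b)
    (hn : max a b < n) :
    (ordered_edges n).2.getD (a, b) 0 = tri_idx n a b := by
  have hg := dict_get_final n a b
  rw [if_pos ⟨h0, hab, hn⟩] at hg
  have hd : (ordered_edges n).2.getD (a, b) 0 = edgeBase n (min a b) + (max a b - min a b - 1) := by
    simp [PySem.Dict.getD, hg]
  rw [hd, tri_idx_eq]

-- ===== VERDICT (by name: the statement is the Claim_ definition above) =====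
theorem triangle_dnf_spec : Claim_equal_triangle_dnf := by
  intro n _
  unfold Spec_triangle_dnf triangle_dnf triangle_dnf_alt
  simp only [PySem.List.foldl_append_singleton_eq_map, PySem.List.foldl_append_eq_flatMap,
    List.nil_append]
  refine List.flatMap_congr ?_
  intro i hi
  rw [PySem.List.mem_pyRange_one] at hi
  refine List.flatMap_congr ?_
  intro j hj
  rw [PySem.List.mem_pyRange_one] at hj
  refine List.map_congr_left ?_
  intro k hk
  rw [PySem.List.mem_pyRange_one] at hk
  rw [getD_eq_tri_idx n i j (by omega) (by omega) (by omega),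
      getD_eq_tri_idx n j k (by omega) (by omega) (by omega),
      getD_eq_tri_idx n k i (by omega) (by omega) (by omega)]
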